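-- pv_equiv track=rewrite | github.com/Mewzok/python-exercises | day37_exercise.py | limited_activity_summary
-- ===== SOURCE A (Python) =====
-- def limited_activity_summary(actions):
--     user_action_count = {}
--     filtered_actions = {"logout"}
--
--     for user, action in actions:
--         if user != "admin" and action not in filtered_actions:
--             if user_action_count.setdefault(user, 0) < 3:
--                 user_action_count[user] += 1
--
--     return user_action_count
-- ===== SOURCE B (Python) =====
-- def limited_activity_summary(actions):
--     # Group-by: keep the valid events, then for each first-seen user count its
--     # occurrences with an inner scan over the valid events and clamp at 3.
--     valid = [(user, action) for user, action in actions
--              if user != "admin" and action != "logout"]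
--     summary = {}
--     for user, _ in valid:
--         if user not in summary:
--             summary[user] = min(sum(1 for v, _ in valid if v == user), 3)
--     return summary
-- ===== Notes on version B (the rewrite author's own statement) =====
-- stated objective: alternative
-- what changed: B replaces A's single-pass incremental capped counter dict by a group-by decomposition: it first filters the valid events into a list, then for each first-seen user counts that user's occurrences with an inner scan over the valid list and clamps the count at 3; it trades A's O(n) streaming update for nested scans.
import Mathlib
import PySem

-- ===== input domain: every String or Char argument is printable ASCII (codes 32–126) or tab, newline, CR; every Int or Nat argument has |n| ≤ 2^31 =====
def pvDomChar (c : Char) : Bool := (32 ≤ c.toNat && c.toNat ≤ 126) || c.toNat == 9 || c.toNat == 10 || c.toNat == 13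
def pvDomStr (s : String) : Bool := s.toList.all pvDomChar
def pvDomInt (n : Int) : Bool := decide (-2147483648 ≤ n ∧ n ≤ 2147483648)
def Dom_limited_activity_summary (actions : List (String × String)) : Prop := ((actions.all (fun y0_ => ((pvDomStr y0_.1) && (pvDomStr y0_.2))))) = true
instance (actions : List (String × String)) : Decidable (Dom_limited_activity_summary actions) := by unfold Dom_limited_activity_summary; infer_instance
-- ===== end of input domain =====

-- B replaces A's streaming capped counter by a group-by decomposition: filter the
-- valid events once, then give each first-seen user min(inner-scan count, 3)
-- (objective: alternative — different algorithm, not claimed faster).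

-- ===== PORT A =====
def limited_activity_summary (actions : List (String × String)) : List (String × Int) :=
  let filtered_actions : PySem.Set String := PySem.Set.ofList ["logout"]
  (actions.foldl (fun user_action_count p =>
      if p.1 != "admin" && !(PySem.Set.contains filtered_actions p.2) then
        let d := user_action_count.setdefault p.1 0
        if d.getD p.1 0 < 3 then d.insert p.1 (d.getD p.1 0 + 1) else d
      else user_action_count) PySem.Dict.empty).items

-- ===== PORT B =====
def limited_activity_summary_alt (actions : List (String × String)) : List (String × Int) :=
  let valid := actions.filter (fun p => p.1 != "admin" && p.2 != "logout")
  (valid.foldl (fun (summary : PySem.Dict String Int) p =>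
      if summary.contains p.1 then summary
      else summary.insert p.1 (min ((valid.countP (fun q => q.1 == p.1) : Int)) 3))
    PySem.Dict.empty).items

-- ===== PRECONDITION & SPEC =====
def Spec_limited_activity_summary (actions : List (String × String)) (out : List (String × Int)) : Prop := out = limited_activity_summary_alt actions
instance (actions : List (String × String)) (out : List (String × Int)) : Decidable (Spec_limited_activity_summary actions out) := by unfold Spec_limited_activity_summary; infer_instance

-- ===== CLAIM (what is proved, stated in full; the proofs are below) =====
def Claim_equal_limited_activity_summary : Prop := ∀ (actions : List (String × String)), Dom_limited_activity_summary actions → Spec_limited_activity_summary actions (limited_activity_summary actions)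

-- ===== LEMMAS AND PROOFS =====

-- A's membership test in the singleton set {"logout"} is the plain inequality test B uses.
theorem pv_cond_logout (a : String) :
    (!(PySem.Set.contains (PySem.Set.ofList ["logout"]) a)) = (a != "logout") := by
  simp [PySem.Set.contains, PySem.Set.ofList, bne]
  cases h : a == "logout" <;> simp_all

-- keys agree under the clamp-items invariant
theorem pv_keys_eq (dA dB : PySem.Dict String Int)
    (hitems : dA.items = dB.items.map (fun q => (q.1, min q.2 3))) :
    dA.keys = dB.keys := by
  simp only [PySem.Dict.keys, hitems, List.map_map]
  rfl

-- Loop invariant: running A's body alongside an uncapped per-user counter loop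
-- keeps A's items equal to the counter's items with values clamped at 3.
theorem pv_loop_inv (l : List (String × String)) (dA dB : PySem.Dict String Int)
    (hitems : dA.items = dB.items.map (fun q => (q.1, min q.2 3)))
    (hnd : dB.keys.Nodup) :
    (l.foldl (fun user_action_count p =>
        if p.1 != "admin" && !(PySem.Set.contains (PySem.Set.ofList ["logout"]) p.2) then
          let d := user_action_count.setdefault p.1 0
          if d.getD p.1 0 < 3 then d.insert p.1 (d.getD p.1 0 + 1) else d
        else user_action_count) dA).items
    = ((l.foldl (fun d p =>
        if p.1 != "admin" && p.2 != "logout" then d.modify p.1 0 (· + 1) else d) dB).items).map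
        (fun q => (q.1, min q.2 3)) := by
  induction l generalizing dA dB with
  | nil => simpa using hitems
  | cons p t ih =>
    rw [List.foldl_cons, List.foldl_cons]
    refine ih _ _ ?_ ?_
    · -- the invariant survives one step of the two loop bodies
      rw [pv_cond_logout]
      by_cases hc : (p.1 != "admin" && p.2 != "logout") = true
      · simp only [hc, if_true, PySem.Dict.modify]
        have hkeys := pv_keys_eq dA dB hitems
        have hndA : dA.keys.Nodup := hkeys ▸ hnd
        by_cases hB : dB.contains p.1 = true
        · have hA : dA.contains p.1 = true := by
            rw [PySem.Dict.contains_eq_decide_mem_keys] at hB ⊢; rw [hkeys]; exact hB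
          obtain ⟨old, hget⟩ : ∃ old, dB.get? p.1 = some old := by
            rw [PySem.Dict.contains_eq_isSome_get?] at hB
            exact Option.isSome_iff_exists.mp hB
          have hmemB : (p.1, old) ∈ dB.items := PySem.Dict.mem_items_of_get?_eq_some dB hget
          have hmemA : (p.1, min old 3) ∈ dA.items := by
            rw [hitems]; exact List.mem_map_of_mem hmemB
          have hgAd : dA.getD p.1 0 = min old 3 :=
            PySem.Dict.getD_of_mem_items dA hmemA hndA 0
          have hgBd : dB.getD p.1 0 = old :=
            PySem.Dict.getD_of_mem_items dB hmemB hnd 0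
          rw [PySem.Dict.setdefault_of_contains dA 0 hA, hgAd, hgBd]
          by_cases h3 : min old 3 < 3
          · rw [if_pos h3, PySem.Dict.items_insert_of_contains dA _ hA,
                PySem.Dict.items_insert_of_contains dB _ hB, hitems, List.map_map, List.map_map]
            apply List.map_congr_left
            intro q hq
            by_cases hqu : (q.1 == p.1) = true
            · simp only [Function.comp, hqu, if_pos]
              have : min old 3 + 1 = min (old + 1) 3 := by omega
              simp [this]
            · simp [Function.comp, hqu]
          · rw [if_neg h3, PySem.Dict.items_insert_of_contains dB _ hB, List.map_map, hitems]
            apply List.map_congr_left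
            intro q hq
            by_cases hqu : (q.1 == p.1) = true
            · have hq1 : q.1 = p.1 := by simpa using hqu
              have hqv : dB.get? q.1 = some q.2 := PySem.Dict.get?_of_mem_items dB hq hnd
              rw [hq1, hget] at hqv
              have hq2 : q.2 = old := by injection hqv with h; exact h.symm
              simp only [Function.comp, hqu, if_pos]
              have h1 : min q.2 3 = 3 := by omega
              have h2 : min (old + 1) 3 = 3 := by omega
              simp [hq1, h1, h2]
            · simp [Function.comp, hqu]
        · have hB' : dB.contains p.1 = false := by simpa using hB
          have hA' : dA.contains p.1 = false := by
            rw [PySem.Dict.contains_eq_decide_mem_keys] at hB' ⊢; rw [hkeys]; exact hB'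
          rw [PySem.Dict.setdefault_of_not_contains dA 0 hA',
              PySem.Dict.getD_insert_self, PySem.Dict.getD_of_not_contains dB 0 hB']
          rw [if_pos (by norm_num : (0:Int) < 3), PySem.Dict.insert_insert_self]
          rw [PySem.Dict.items_insert_of_not_contains dA _ hA',
              PySem.Dict.items_insert_of_not_contains dB _ hB', List.map_append, hitems]
          simp
      · simp [hc, hitems]
    · by_cases hc : (p.1 != "admin" && p.2 != "logout") = true
      · simp only [hc, if_true, PySem.Dict.modify]
        exact PySem.Dict.nodup_keys_insert dB p.1 _ hnd
      · simpa [hc] using hnd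

-- A's guarded counter loop is the same counter loop over the filtered list
theorem pv_guard_modify :
    ∀ (l : List (String × String)) (d : PySem.Dict String Int),
      l.foldl (fun d p =>
          if p.1 != "admin" && p.2 != "logout" then d.modify p.1 0 (· + 1) else d) d
        = (l.filter (fun p => p.1 != "admin" && p.2 != "logout")).foldl
            (fun d p => d.modify p.1 0 (· + 1)) d := by
  intro l
  induction l with
  | nil => intro d; rfl
  | cons p t ih =>
    intro d
    rw [List.foldl_cons]
    by_cases h : (p.1 != "admin" && p.2 != "logout") = true
    · rw [if_pos h, List.filter_cons_of_pos (p := fun x : String × String => x.1 != "admin" && x.2 != "logout") h, List.foldl_cons]; exact ih _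
    · rw [if_neg h, List.filter_cons_of_neg (p := fun x : String × String => x.1 != "admin" && x.2 != "logout") (by simpa using h)]; exact ih _

-- a fold of inserts whose value depends only on the key: getD reads off membership
theorem pv_getD_fold_insert (g : String → Int) :
    ∀ (us : List String) (d : PySem.Dict String Int) (k : String) (df : Int),
      (us.foldl (fun d u => d.insert u (g u)) d).getD k df
        = if k ∈ us then g k else d.getD k df := by
  intro us
  induction us with
  | nil => intro d k df; simp
  | cons u t ih =>
    intro d k df
    rw [List.foldl_cons, ih]
    by_cases ht : k ∈ t
    · simp [ht]
    · by_cases hu : k = u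
      · simp [hu]
      · simp [ht, hu, PySem.Dict.getD_insert]

-- a fold that only uses the first components is a fold over the projected list
theorem pv_foldl_fst {α : Type} (g : α → String → α) :
    ∀ (l : List (String × String)) (init : α),
      l.foldl (fun a p => g a p.1) init = (l.map (·.1)).foldl g init := by
  intro l
  induction l with
  | nil => intro init; rfl
  | cons p t ih => intro init; simp [ih]

-- B's conditional insert equals the unconditional insert when every stored value is g of its key
theorem pv_cond_insert_eq (g : String → Int) :
    ∀ (l : List String) (d : PySem.Dict String Int),
      (∀ q ∈ d.items, q.2 = g q.1) → d.keys.Nodup →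
      l.foldl (fun d u => if d.contains u then d else d.insert u (g u)) d
        = l.foldl (fun d u => d.insert u (g u)) d := by
  intro l
  induction l with
  | nil => intro d _ _; rfl
  | cons u t ih =>
    intro d hval hnd
    rw [List.foldl_cons, List.foldl_cons]
    by_cases hc : d.contains u = true
    · have heq : d = d.insert u (g u) := by
        apply PySem.Dict.ext
        have hpt : ∀ q ∈ d.items, (if q.1 == u then (u, g u) else q) = q := by
          intro q hq
          by_cases hqu : (q.1 == u) = true
          · have h1 : q.1 = u := by simpa using hqu
            have h2 : q.2 = g q.1 := hval q hq
            simp [← h1, ← h2]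
          · simp [hqu]
        rw [PySem.Dict.items_insert_of_contains d _ hc, List.map_congr_left hpt]
        simp
      rw [if_pos hc]
      conv_rhs => rw [← heq]
      exact ih d hval hnd
    · rw [if_neg hc]
      refine ih _ (fun q hq => ?_) (PySem.Dict.nodup_keys_insert d u _ hnd)
      rcases (PySem.Dict.mem_items_insert d u (g u) q).mp hq with h | h
      · rw [h]
      · exact hval q h.1

-- the items of that insert fold from empty: distinct keys in order, each valued g
theorem pv_items_fold_insert (g : String → Int) (us : List String) :
    ((us.foldl (fun d u => d.insert u (g u)) PySem.Dict.empty) :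
        PySem.Dict String Int).items
      = (PySem.Set.ofList us).map (fun u => (u, g u)) := by
  have hkeys : ((us.foldl (fun d u => d.insert u (g u)) PySem.Dict.empty) :
      PySem.Dict String Int).keys = PySem.Set.ofList us := by
    rw [PySem.Dict.keys_foldl_insert]
    simp [PySem.Dict.keys_empty, PySem.Set.update_nil_left]
  have hnd : ((us.foldl (fun d u => d.insert u (g u)) PySem.Dict.empty) :
      PySem.Dict String Int).keys.Nodup :=
    PySem.Dict.nodup_keys_foldl_insert us _ _ (by simp [PySem.Dict.keys_empty])
  rw [PySem.Dict.items_eq_map_keys _ hnd 0, hkeys]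
  apply List.map_congr_left
  intro u hu
  have hmem : u ∈ us := (PySem.Set.mem_ofList us u).mp hu
  rw [pv_getD_fold_insert g us PySem.Dict.empty u 0, if_pos hmem]

-- the core identity on the filtered list: clamped counter items = B's group-by items
theorem pv_core (valid : List (String × String)) :
    ((valid.foldl (fun d p => d.modify p.1 0 (· + 1)) PySem.Dict.empty).items).map
        (fun q => (q.1, min q.2 3))
      = (valid.foldl (fun (summary : PySem.Dict String Int) p =>
          if summary.contains p.1 then summary
          else summary.insert p.1 (min ((valid.countP (fun q => q.1 == p.1) : Int)) 3))
          PySem.Dict.empty).items := by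
  have hB : (valid.foldl (fun (summary : PySem.Dict String Int) p =>
        if summary.contains p.1 then summary
        else summary.insert p.1 (min ((valid.countP (fun q => q.1 == p.1) : Int)) 3))
        PySem.Dict.empty)
      = (valid.map (·.1)).foldl
          (fun d u => d.insert u (min ((valid.countP (fun q => q.1 == u) : Int)) 3))
          PySem.Dict.empty := by
    have h1 : (valid.foldl (fun (summary : PySem.Dict String Int) p =>
          if summary.contains p.1 then summary
          else summary.insert p.1 (min ((valid.countP (fun q => q.1 == p.1) : Int)) 3))
          PySem.Dict.empty)
        = (valid.map (·.1)).foldl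
            (fun d u => if d.contains u then d
              else d.insert u (min ((valid.countP (fun q => q.1 == u) : Int)) 3))
            PySem.Dict.empty :=
      pv_foldl_fst (fun d u => if d.contains u then d
          else d.insert u (min ((valid.countP (fun q => q.1 == u) : Int)) 3))
        valid PySem.Dict.empty
    rw [h1]
    exact pv_cond_insert_eq _ _ _ (by simp [PySem.Dict.empty])
      (by simp [PySem.Dict.empty, PySem.Dict.keys])
  have hA : (valid.foldl (fun (d : PySem.Dict String Int) p => d.modify p.1 0 (· + 1))
        PySem.Dict.empty)
      = PySem.Dict.counter (valid.map (·.1)) := by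
    have h1 : (valid.foldl (fun (d : PySem.Dict String Int) p => d.modify p.1 0 (· + 1))
          PySem.Dict.empty)
        = (valid.map (·.1)).foldl (fun d u => d.modify u 0 (· + 1)) PySem.Dict.empty :=
      pv_foldl_fst (fun (d : PySem.Dict String Int) u => d.modify u 0 (· + 1)) valid PySem.Dict.empty
    rw [h1, PySem.Dict.counter_eq_foldl]
  rw [hA, hB, pv_items_fold_insert, PySem.Dict.items_counter, List.map_map]
  apply List.map_congr_left
  intro u hu
  have hcnt : ((valid.map (·.1)).count u : Int) = (valid.countP (fun q => q.1 == u) : Int) := by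
    rw [List.count, List.countP_map]; rfl
  simp [hcnt]

-- ===== VERDICT (by name: the statement is the Claim_ definition above) =====
theorem limited_activity_summary_spec : Claim_equal_limited_activity_summary := by
  intro actions _
  have hA := pv_loop_inv actions PySem.Dict.empty PySem.Dict.empty
    (by simp [PySem.Dict.empty]) (by simp [PySem.Dict.empty, PySem.Dict.keys])
  simp only [Spec_limited_activity_summary, limited_activity_summary,
    limited_activity_summary_alt]
  rw [hA, pv_guard_modify]
  generalize actions.filter (fun p => p.1 != "admin" && p.2 != "logout") = valid
  exact pv_core valid
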